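-- pv_equiv track=rewrite | github.com/pruthvz/setup-sheetgen | app.py | extract_pdf_header_for_verify
-- ===== SOURCE A (Python) =====
-- def extract_pdf_header_for_verify(pdf_path: str, full_text: str) -> str:
--     """
--     Extract order header / YourRef section from PDF text for use in part parsing.
--     YourRef often contains TYPE N I LH etc. Returns first ~40 lines to capture header.
--     """
--     if not full_text:
--         return ""
--     lines = full_text.replace("\r", "\n").split("\n")
--     header_lines = []
--     for i, line in enumerate(lines):
--         if i >= 45:
--             break
--         header_lines.append(line)
--         if "YourRef" in line or "Your Ref" in line:
--             for j in range(i + 1, min(i + 5, len(lines))):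
--                 header_lines.append(lines[j])
--             break
--     return " ".join(header_lines)
-- ===== SOURCE B (Python) =====
-- def extract_pdf_header_for_verify(pdf_path: str, full_text: str) -> str:
--     """Flat-text strategy: instead of scanning line by line, search the whole
--     normalized text for each marker with str.find, convert the match offset to
--     a line number by counting the newlines before it, and cut with one slice."""
--     if not full_text:
--         return ""
--     t = full_text.replace("\r", "\n")
--     best = None
--     for pat in ("YourRef", "Your Ref"):
--         p = t.find(pat)
--         if p != -1:
--             ln = t[:p].count("\n")
--             if ln < 45 and (best is None or ln < best):
--                 best = ln
--     lines = t.split("\n")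
--     k = 45 if best is None else best + 5
--     return " ".join(lines[:k])
-- ===== Notes on version B (the rewrite author's own statement) =====
-- stated objective: alternative
-- what changed: Replaced A's line-by-line scan (enumerate lines, append to an accumulator, break on marker with a 4-line look-ahead loop) by a flat-text search: each marker is located in the whole normalized text with str.find, the match offset is turned into a line number by counting the newlines before it, and the header is produced with one slice and one join.
import Mathlib
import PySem

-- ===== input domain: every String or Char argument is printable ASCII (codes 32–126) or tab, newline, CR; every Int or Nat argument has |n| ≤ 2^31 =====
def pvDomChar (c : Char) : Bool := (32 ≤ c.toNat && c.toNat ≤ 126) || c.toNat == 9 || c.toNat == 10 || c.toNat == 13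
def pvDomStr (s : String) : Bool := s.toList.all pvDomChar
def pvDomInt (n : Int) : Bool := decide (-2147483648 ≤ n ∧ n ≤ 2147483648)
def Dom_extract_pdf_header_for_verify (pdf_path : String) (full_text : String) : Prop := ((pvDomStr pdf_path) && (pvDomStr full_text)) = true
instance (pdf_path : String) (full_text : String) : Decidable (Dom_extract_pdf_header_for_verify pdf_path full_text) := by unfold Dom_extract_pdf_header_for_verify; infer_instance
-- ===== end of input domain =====

-- B replaces A's line-by-line scan by a flat-text substring search: find each marker
-- in the whole normalized text, turn the match offset into a line number by counting
-- the newlines before it, and cut with one slice; objective: alternative.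

-- ===== PORT A =====
-- the loop of A: i is the enumerate index, rest the remaining lines, acc = header_lines so far
def pvGoA (lines : List String) : Nat → List String → List String → List String
  | _, [], acc => acc
  | i, l :: t, acc =>
    if 45 ≤ i then acc
    else
      let acc' := acc ++ [l]
      if PySem.Str.isIn "YourRef" l || PySem.Str.isIn "Your Ref" l then
        acc' ++ (PySem.List.pyRange ((i : Int) + 1) (min ((i : Int) + 5) (lines.length : Int)) 1).map
          (fun j => PySem.List.pyGetD lines j "")
      else pvGoA lines (i + 1) t acc'

def extract_pdf_header_for_verify (pdf_path : String) (full_text : String) : String :=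
  if full_text = "" then ""
  else
    let lines := (PySem.Str.split? (PySem.Str.replace full_text "\r" "\n") "\n").getD []
    PySem.Str.join " " (pvGoA lines 0 lines [])

-- ===== PORT B =====
-- one step of B's 'for pat in ("YourRef", "Your Ref")' loop over the flat text t
def pvBestStep (t : String) (best : Option Nat) (pat : String) : Option Nat :=
  let p := PySem.Str.find t pat
  if p ≠ -1 then
    let ln := PySem.Str.count (PySem.Str.slice t none (some p)) "\n"
    if ln < 45 && (match best with | none => true | some b => decide (ln < b)) then some ln else best
  else best

def extract_pdf_header_for_verify_alt (pdf_path : String) (full_text : String) : String :=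
  if full_text = "" then ""
  else
    let t := PySem.Str.replace full_text "\r" "\n"
    let best := ["YourRef", "Your Ref"].foldl (pvBestStep t) none
    let lines := (PySem.Str.split? t "\n").getD []
    let k : Nat := match best with | none => 45 | some b => b + 5
    PySem.Str.join " " (lines.take k)

-- ===== PRECONDITION & SPEC =====
def Spec_extract_pdf_header_for_verify (pdf_path : String) (full_text : String) (out : String) : Prop := out = extract_pdf_header_for_verify_alt pdf_path full_text
instance (pdf_path : String) (full_text : String) (out : String) : Decidable (Spec_extract_pdf_header_for_verify pdf_path full_text out) := by unfold Spec_extract_pdf_header_for_verify; infer_instance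

-- ===== CLAIM (what is proved, stated in full; the proofs are below) =====
def Claim_equal_extract_pdf_header_for_verify : Prop := ∀ (pdf_path : String) (full_text : String), Dom_extract_pdf_header_for_verify pdf_path full_text → Spec_extract_pdf_header_for_verify pdf_path full_text (extract_pdf_header_for_verify pdf_path full_text)

-- ===== LEMMAS AND PROOFS =====

-- ---- A-side: characterise A's loop as find-first-line-then-take ----

-- the 4-line look-ahead window starting after position m, as A computes it
def pvWindow (lines : List String) (m : Nat) : List String :=
  (PySem.List.pyRange ((m : Int) + 1) (min ((m : Int) + 5) (lines.length : Int)) 1).map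
    (fun j => PySem.List.pyGetD lines j "")

def pvP (l : String) : Bool := PySem.Str.isIn "YourRef" l || PySem.Str.isIn "Your Ref" l

lemma pvMapRange (xs : List String) (a n : Nat) (h : a + n ≤ xs.length) :
    (PySem.List.pyRange (a : Int) ((a : Int) + (n : Int)) 1).map (fun j => PySem.List.pyGetD xs j "")
      = (xs.drop a).take n := by
  induction n generalizing a with
  | zero => simp [PySem.List.pyRange_one_eq_nil]
  | succ n ih =>
    rw [PySem.List.pyRange_one_cons (by omega)]
    have ha : a < xs.length := by omega
    have h1 : ((a : Int) + 1) = ((a + 1 : Nat) : Int) := by push_cast; ring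
    have h2 : ((a : Int) + ((n + 1 : Nat) : Int)) = ((a + 1 : Nat) : Int) + (n : Nat) := by
      push_cast; ring
    rw [List.map_cons, h2, h1, ih (a + 1) (by omega)]
    rw [List.drop_eq_getElem_cons ha, List.take_succ_cons]
    congr 1
    rw [PySem.List.pyGetD_natCast]
    simp [List.getD_eq_getElem?_getD, ha]

lemma pvWindow_eq (lines : List String) (m : Nat) (hm : m < lines.length) :
    pvWindow lines m = (lines.drop (m + 1)).take 4 := by
  unfold pvWindow
  have hmin : min ((m : Int) + 5) (lines.length : Int)
      = ((m + 1 : Nat) : Int) + ((min (m + 5) lines.length - (m + 1) : Nat) : Int) := by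
    omega
  have h1 : ((m : Int) + 1) = ((m + 1 : Nat) : Int) := by push_cast; ring
  rw [hmin, h1, pvMapRange lines (m + 1) (min (m + 5) lines.length - (m + 1)) (by omega)]
  by_cases h : m + 5 ≤ lines.length
  · congr 1; omega
  · have hlen : (lines.drop (m + 1)).length = lines.length - (m + 1) := by simp
    rw [List.take_of_length_le (by omega), List.take_of_length_le (by omega)]

-- characterisation of A's loop from state (i, drop i, acc)
lemma pvGoA_eq (lines : List String) (rest : List String) (i : Nat) (acc : List String)
    (hrest : rest = lines.drop i) :
    pvGoA lines i rest acc
      = acc ++ (match ((lines.drop i).take (45 - i)).findIdx? pvP with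
          | none => (lines.drop i).take (45 - i)
          | some k => (lines.drop i).take (k + 1) ++ pvWindow lines (i + k)) := by
  induction rest generalizing i acc with
  | nil => simp [pvGoA, ← hrest]
  | cons l t ih =>
    rw [← hrest, pvGoA]
    by_cases h45 : 45 ≤ i
    · have h0 : 45 - i = 0 := by omega
      rw [if_pos h45, h0]
      simp
    · have ht : t = lines.drop (i + 1) := by
        have h' := congrArg (List.drop 1) hrest
        simp only [List.drop_drop] at h'
        simpa [Nat.add_comm] using h'
      have htk : 45 - i = 45 - (i + 1) + 1 := by omega
      rw [if_neg h45]
      by_cases hp : pvP l = true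
      · rw [htk, List.take_succ_cons, List.findIdx?_cons, hp]
        have hp' : (PySem.Str.isIn "YourRef" l || PySem.Str.isIn "Your Ref" l) = true := hp
        rw [hp']
        simp only [List.take_succ_cons, pvWindow]
        simp [List.append_assoc]
      · have hp' : pvP l = false := by simpa using hp
        have hp'' : (PySem.Str.isIn "YourRef" l || PySem.Str.isIn "Your Ref" l) = false := hp'
        rw [htk, List.take_succ_cons, List.findIdx?_cons, hp', hp'']
        simp only [Bool.false_eq_true, if_false]
        rw [ih (i + 1) (acc ++ [l]) ht, ← ht]
        cases hfi : (t.take (45 - (i + 1))).findIdx? pvP with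
        | none => simp [List.append_assoc]
        | some k =>
          simp only [Option.map_some]
          rw [List.take_succ_cons]
          have hik : i + (k + 1) = (i + 1) + k := by omega
          rw [hik]
          simp [List.append_assoc]

lemma pvHeader_eq (lines : List String) :
    pvGoA lines 0 lines []
      = (match (lines.take 45).findIdx? pvP with
          | none => lines.take 45
          | some k => lines.take (k + 5)) := by
  rw [pvGoA_eq lines lines 0 [] (by simp)]
  simp only [List.drop_zero, Nat.sub_zero, List.nil_append, Nat.zero_add]
  cases hfi : (lines.take 45).findIdx? pvP with
  | none => rfl
  | some k =>
    have hk : k < (lines.take 45).length := (List.findIdx?_eq_some_iff_findIdx_eq.mp hfi).1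
    have hk' : k < lines.length := by simp at hk; omega
    simp only [pvWindow_eq lines k hk']
    have h5 : k + 5 = (k + 1) + 4 := by omega
    rw [h5]
    conv_rhs => rw [List.take_add]

-- ---- PySem.Chars.count on a one-character needle is List.count ----

lemma pvCountGo (ch : Char) (fuel : Nat) (l : List Char) (acc : Nat) (h : l.length ≤ fuel) :
    PySem.Chars.count.go [ch] fuel l acc = acc + l.count ch := by
  induction l generalizing fuel acc with
  | nil => cases fuel <;> simp [PySem.Chars.count.go]
  | cons c' t ih =>
    cases fuel with
    | zero => simp at h
    | succ f =>
      rw [PySem.Chars.count.go]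
      by_cases hc : ch = c'
      · subst hc
        simp only [List.isPrefixOf, BEq.rfl, Bool.true_and, if_pos, List.length_cons,
          List.drop_succ_cons]
        rw [show List.drop ([] : List Char).length t = t by simp]
        rw [ih f (acc+1) (by simpa using Nat.le_of_succ_le_succ h)]
        simp
        omega
      · have hpre : ([ch].isPrefixOf (c' :: t)) = false := by
          simp [List.isPrefixOf, hc]
        rw [hpre]
        simp only [Bool.false_eq_true, if_false]
        rw [ih f acc (by simpa using Nat.le_of_succ_le_succ h)]
        simp [Ne.symm hc]

lemma pvCountChar (l : List Char) (ch : Char) : PySem.Chars.count l [ch] = l.count ch := by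
  rw [PySem.Chars.count]
  simp only [List.isEmpty_cons, Bool.false_eq_true, if_false]
  simpa using pvCountGo ch l.length l 0 le_rfl

-- ---- PySem.Chars.splitOn on a one-character separator is Mathlib's List.splitOn ----

lemma pvSplitGo (c : Char) (fuel : Nat) (l cur : List Char) (acc : List (List Char))
    (h : l.length ≤ fuel) :
    PySem.Chars.splitOn.go [c] fuel l cur acc
      = acc.reverse ++ (List.splitOnP (· == c) l).modifyHead (cur.reverse ++ ·) := by
  induction l generalizing fuel cur acc with
  | nil => cases fuel <;> simp [PySem.Chars.splitOn.go, List.splitOnP_nil]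
  | cons c' t ih =>
    cases fuel with
    | zero => simp at h
    | succ f =>
      rw [PySem.Chars.splitOn.go]
      by_cases hc : c = c'
      · subst hc
        simp only [List.isPrefixOf, BEq.rfl, Bool.true_and, if_pos]
        rw [show List.drop [c].length (c :: t) = t by simp]
        rw [ih f [] (cur.reverse :: acc) (by simpa using Nat.le_of_succ_le_succ h)]
        rw [List.splitOnP_cons]
        cases hsp : List.splitOnP (· == c) t with
        | nil => exact absurd hsp (List.splitOnP_ne_nil _ _)
        | cons hd tl => simp
      · have hpre : ([c].isPrefixOf (c' :: t)) = false := by simp [List.isPrefixOf, hc]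
        rw [hpre]
        simp only [Bool.false_eq_true, if_false]
        rw [ih f (c' :: cur) acc (by simpa using Nat.le_of_succ_le_succ h)]
        rw [List.splitOnP_cons]
        have hc2 : (c' == c) = false := by simp [Ne.symm hc]
        rw [hc2]
        simp only [Bool.false_eq_true, if_false]
        cases hsp : List.splitOnP (· == c) t with
        | nil => exact absurd hsp (List.splitOnP_ne_nil _ _)
        | cons hd tl => simp

lemma pvSplitEq (c : Char) (s : List Char) : PySem.Chars.splitOn s [c] = List.splitOn c s := by
  rw [PySem.Chars.splitOn, pvSplitGo c (s.length+1) s [] [] (by omega)]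
  cases hsp : List.splitOnP (· == c) s with
  | nil => exact absurd hsp (List.splitOnP_ne_nil _ _)
  | cons hd tl => simp [List.splitOn, hsp]

lemma pvNotMemSplit (c : Char) (l m : List Char) (hm : m ∈ List.splitOnP (· == c) l) : c ∉ m := by
  induction l generalizing m with
  | nil => simp [List.splitOnP_nil] at hm; simp [hm]
  | cons c' t ih =>
    rw [List.splitOnP_cons] at hm
    by_cases hc : c' = c
    · simp [hc] at hm
      rcases hm with h | h
      · simp [h]
      · exact ih m h
    · have : (c' == c) = false := by simp [hc]
      rw [this] at hm
      simp only [Bool.false_eq_true, if_false] at hm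
      cases hsp : List.splitOnP (· == c) t with
      | nil => exact absurd hsp (List.splitOnP_ne_nil _ _)
      | cons hd tl =>
        rw [hsp] at hm
        simp at hm
        rcases hm with h | h
        · subst h
          intro hmem
          rcases List.mem_cons.mp hmem with h | h
          · exact hc h.symm
          · exact ih hd (by rw [hsp]; exact List.mem_cons_self) h
        · exact ih m (by rw [hsp]; exact List.mem_cons_of_mem _ h)

-- ---- find points at the first occurrence: uniqueness ----

lemma pvInfixOfDrop (pat t : List Char) (j : Nat) (h : pat <+: t.drop j) : pat <:+: t :=
  h.isInfix.trans (t.drop_suffix j).isInfix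

lemma pvFindFirst (s pat : List Char) (q : Nat) (h1 : pat <+: s.drop q)
    (h2 : ∀ i < q, ¬ pat <+: s.drop i) : PySem.Chars.find s pat = (q : Int) := by
  have hinf : pat <:+: s := pvInfixOfDrop pat s q h1
  have hge : 0 ≤ PySem.Chars.find s pat := (PySem.Chars.find_nonneg_iff s pat).mpr hinf
  obtain ⟨hpre, hmin⟩ := PySem.Chars.find_spec hge
  have hA : ¬ q < (PySem.Chars.find s pat).toNat := fun hlt => hmin q hlt h1
  have hB : ¬ (PySem.Chars.find s pat).toNat < q := fun hlt => h2 _ hlt hpre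
  have : (PySem.Chars.find s pat).toNat = q := by omega
  rw [← this, Int.toNat_of_nonneg hge]

-- no occurrence of pat can start inside l or at the separator when pat avoids both
lemma pvNoPrefixLeft (pat l r : List Char) (hne : pat ≠ []) (hp : ('\n' : Char) ∉ pat)
    (hl : PySem.Chars.isIn pat l = false) (i : Nat) (hi : i ≤ l.length) :
    ¬ pat <+: (l ++ '\n' :: r).drop i := by
  intro hpre
  rw [List.drop_append_of_le_length hi] at hpre
  by_cases hlen : pat.length ≤ (l.drop i).length
  · have heq : pat = (l.drop i).take pat.length :=
      (List.prefix_iff_eq_take.mp hpre).trans (List.take_append_of_le_length hlen)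
    have hpl : pat <+: l.drop i := heq ▸ List.take_prefix _ _
    have : PySem.Chars.isIn pat l = true :=
      (PySem.Chars.exists_prefix_drop_iff_isIn pat l).mp ⟨i, hpl⟩
    simp [this] at hl
  · have hlen' : (l.drop i).length < pat.length := Nat.lt_of_not_le hlen
    have := hpre.getElem (i := (l.drop i).length) (by omega)
    rw [List.getElem_append_right (le_refl (l.drop i).length)] at this
    simp at this
    exact hp (this ▸ List.getElem_mem _)

-- the flat search: find on the '\n'-join of the lines locates the first line containing pat,
-- and the number of newlines before the hit is that line's index
lemma pvFlat (pat : List Char) (hne : pat ≠ []) (hp : ('\n' : Char) ∉ pat)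
    (ls : List (List Char)) (hl : ∀ l ∈ ls, ('\n' : Char) ∉ l) :
    (PySem.Chars.find (PySem.Chars.join ['\n'] ls) pat = -1
        ∧ ls.findIdx? (fun m => PySem.Chars.isIn pat m) = none)
    ∨ ∃ p k : Nat, PySem.Chars.find (PySem.Chars.join ['\n'] ls) pat = (p : Int)
        ∧ ((PySem.Chars.join ['\n'] ls).take p).count '\n' = k
        ∧ ls.findIdx? (fun m => PySem.Chars.isIn pat m) = some k := by
  induction ls with
  | nil =>
    left
    constructor
    · rw [PySem.Chars.join_nil, PySem.Chars.find_eq_neg_one_iff]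
      intro hinf
      exact hne (List.eq_nil_of_infix_nil hinf)
    · rfl
  | cons l ls' ih =>
    have hll : ('\n' : Char) ∉ l := hl l List.mem_cons_self
    by_cases hIn : PySem.Chars.isIn pat l = true
    · -- pat occurs in the first line
      right
      obtain ⟨j, hj⟩ := (PySem.Chars.exists_prefix_drop_iff_isIn pat l).mpr hIn
      have hjne : l.drop j ≠ [] := fun h => hne (List.prefix_nil.mp (h ▸ hj))
      have hjle : j ≤ l.length := by
        by_contra hgt
        exact hjne (List.drop_eq_nil_of_le (by omega))
      obtain ⟨rest, hrest⟩ : ∃ rest, PySem.Chars.join ['\n'] (l :: ls') = l ++ rest := by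
        cases ls' with
        | nil => exact ⟨[], by simp [PySem.Chars.join_singleton]⟩
        | cons m r => exact ⟨'\n' :: PySem.Chars.join ['\n'] (m :: r), by
            rw [PySem.Chars.join_cons_cons]; simp⟩
      set t := PySem.Chars.join ['\n'] (l :: ls') with ht
      have hjt : pat <+: t.drop j := by
        rw [hrest, List.drop_append_of_le_length hjle]
        exact hj.trans (List.prefix_append _ _)
      have hge : 0 ≤ PySem.Chars.find t pat :=
        (PySem.Chars.find_nonneg_iff t pat).mpr (pvInfixOfDrop pat t j hjt)
      obtain ⟨hpre, hmin⟩ := PySem.Chars.find_spec hge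
      set p := (PySem.Chars.find t pat).toNat with hpdef
      have hple : p ≤ j := by
        by_contra hgt
        exact hmin j (by omega) hjt
      refine ⟨p, 0, (Int.toNat_of_nonneg hge).symm, ?_, ?_⟩
      · rw [hrest, List.take_append_of_le_length (by omega)]
        rw [List.count_eq_zero]
        intro hmem
        exact hll (List.mem_of_mem_take hmem)
      · rw [List.findIdx?_cons, hIn]
        rfl
    · -- pat does not occur in the first line
      have hIn' : PySem.Chars.isIn pat l = false := by simpa using hIn
      have hfl : PySem.Chars.find l pat = -1 := by
        by_contra hff
        have : PySem.Chars.isIn pat l = true := by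
          simp [PySem.Chars.isIn, bne, hff]
        simp [this] at hIn'
      cases ls' with
      | nil =>
        left
        refine ⟨?_, ?_⟩
        · rw [PySem.Chars.join_singleton]; exact hfl
        · rw [List.findIdx?_cons, hIn']; rfl
      | cons m r =>
        have ht : PySem.Chars.join ['\n'] (l :: m :: r)
            = l ++ '\n' :: PySem.Chars.join ['\n'] (m :: r) := by
          rw [PySem.Chars.join_cons_cons]; simp
        set t' := PySem.Chars.join ['\n'] (m :: r) with ht'
        have hu : (l ++ ['\n']).length = l.length + 1 := by simp
        have hassoc : l ++ '\n' :: t' = (l ++ ['\n']) ++ t' := by simp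
        rcases ih (fun x hx => hl x (List.mem_cons_of_mem _ hx)) with ⟨hf', hfi'⟩ | ⟨p', k', hfind', hcount', hfi'⟩
        · left
          refine ⟨?_, ?_⟩
          · rw [ht, PySem.Chars.find_eq_neg_one_iff]
            intro hinf
            obtain ⟨i, hi⟩ := (PySem.Chars.exists_prefix_drop_iff_isIn pat _).mpr
              ((PySem.Chars.isIn_iff_infix pat _).mpr hinf)
            by_cases hil : i ≤ l.length
            · exact pvNoPrefixLeft pat l t' hne hp hIn' i hil hi
            · have hi2 : i = (l ++ ['\n']).length + (i - (l.length + 1)) := by simp; omega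
              have : (l ++ '\n' :: t').drop i = t'.drop (i - (l.length + 1)) := by
                rw [hassoc]
                conv_lhs => rw [hi2]
                exact List.drop_length_add_append _
              rw [this] at hi
              have : pat <:+: t' := pvInfixOfDrop pat t' _ hi
              rw [← PySem.Chars.find_ne_neg_one_iff] at this
              exact this hf'
          · rw [List.findIdx?_cons, hIn', hfi']; rfl
        · right
          have hge' : 0 ≤ PySem.Chars.find t' pat := by rw [hfind']; positivity
          obtain ⟨hpre', hmin'⟩ := PySem.Chars.find_spec hge'
          have htn : (PySem.Chars.find t' pat).toNat = p' := by rw [hfind']; simp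
          rw [htn] at hpre'
          rw [htn] at hmin'
          refine ⟨l.length + 1 + p', k' + 1, ?_, ?_, ?_⟩
          · rw [ht]
            apply pvFindFirst
            · rw [hassoc, show l.length + 1 + p' = (l ++ ['\n']).length + p' by simp]
              rw [List.drop_length_add_append]
              exact hpre'
            · intro i hilt
              by_cases hil : i ≤ l.length
              · exact pvNoPrefixLeft pat l t' hne hp hIn' i hil
              · intro hpref
                have hi2 : i = (l ++ ['\n']).length + (i - (l.length + 1)) := by simp; omega
                have hdrop : (l ++ '\n' :: t').drop i = t'.drop (i - (l.length + 1)) := by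
                  rw [hassoc]
                  conv_lhs => rw [hi2]
                  exact List.drop_length_add_append _
                rw [hdrop] at hpref
                exact hmin' (i - (l.length + 1)) (by omega) hpref
          · rw [ht, hassoc, show l.length + 1 + p' = (l ++ ['\n']).length + p' by simp]
            rw [List.take_length_add_append]
            rw [List.count_append]
            have h0 : (l ++ ['\n']).count '\n' = 1 := by
              rw [List.count_append, List.count_eq_zero.mpr hll]
              simp
            rw [h0, hcount']
            omega
          · rw [List.findIdx?_cons, hIn', hfi']; rfl

-- ---- option bookkeeping for findIdx? over take and disjunction ----

def pvOmin : Option Nat → Option Nat → Option Nat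
  | none, b => b
  | a, none => a
  | some a, some b => some (min a b)

lemma pvFindIdxOr {α : Type} (q1 q2 : α → Bool) (ls : List α) :
    ls.findIdx? (fun m => q1 m || q2 m) = pvOmin (ls.findIdx? q1) (ls.findIdx? q2) := by
  induction ls with
  | nil => rfl
  | cons x t ih =>
    simp only [List.findIdx?_cons]
    by_cases h1 : q1 x = true
    · by_cases h2 : q2 x = true
      · simp [h1, h2, pvOmin]
      · have h2' : q2 x = false := by simpa using h2
        simp only [h1, h2', Bool.true_or, if_pos, Bool.false_eq_true, if_false]
        cases t.findIdx? q2 <;> simp [pvOmin]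
    · have h1' : q1 x = false := by simpa using h1
      by_cases h2 : q2 x = true
      · simp only [h1', h2, Bool.or_true, if_pos, Bool.false_eq_true, if_false]
        cases t.findIdx? q1 <;> simp [pvOmin]
      · have h2' : q2 x = false := by simpa using h2
        simp only [h1', h2', Bool.or_false, Bool.false_eq_true, if_false, ih]
        cases ha : t.findIdx? q1 <;> cases hb : t.findIdx? q2 <;> simp [pvOmin]

lemma pvFindIdxTake {α : Type} (q : α → Bool) (n : Nat) (ls : List α) :
    (ls.take n).findIdx? q = (ls.findIdx? q).bind (fun k => if k < n then some k else none) := by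
  induction ls generalizing n with
  | nil => simp
  | cons x t ih =>
    cases n with
    | zero =>
      simp only [List.take_zero]
      rw [List.findIdx?_cons]
      by_cases h : q x = true
      · simp [h]
      · have h' : q x = false := by simpa using h
        simp only [h', Bool.false_eq_true, if_false, List.findIdx?_nil]
        cases t.findIdx? q <;> simp
    | succ n =>
      rw [List.take_succ_cons, List.findIdx?_cons, List.findIdx?_cons]
      by_cases h : q x = true
      · simp [h]
      · have h' : q x = false := by simpa using h
        simp only [h', Bool.false_eq_true, if_false, ih n]
        cases t.findIdx? q with
        | none => rfl
        | some k =>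
          simp only [Option.bind_some, Option.map_some]
          by_cases hk : k < n
          · simp [hk, Nat.succ_lt_succ hk]
          · have : ¬ k + 1 < n + 1 := by omega
            simp [hk, this]

-- ---- one step of B's pattern loop, in terms of the line index of the first hit ----

lemma pvJoinSplit (t : String) :
    PySem.Chars.join ['\n'] (List.splitOn '\n' t.toList) = t.toList := by
  simpa [PySem.Chars.join] using List.intercalate_splitOn t.toList '\n'

lemma pvStep (t pat : String) (b : Option Nat)
    (hne : pat.toList ≠ []) (hp : ('\n' : Char) ∉ pat.toList)
    (hmem : ∀ m ∈ List.splitOn '\n' t.toList, ('\n' : Char) ∉ m) :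
    pvBestStep t b pat
      = match (List.splitOn '\n' t.toList).findIdx? (fun m => PySem.Chars.isIn pat.toList m) with
        | none => b
        | some k => if k < 45 && (match b with | none => true | some bb => decide (k < bb))
            then some k else b := by
  rcases pvFlat pat.toList hne hp _ hmem with ⟨hf, hfi⟩ | ⟨p, k, hfind, hcount, hfi⟩
  · rw [pvJoinSplit] at hf
    rw [hfi]
    simp [pvBestStep, hf]
  · rw [pvJoinSplit] at hfind hcount
    rw [hfi]
    simp only [pvBestStep]
    have hfindS : PySem.Str.find t pat = (p : Int) := by
      rw [PySem.Str.find_eq, hfind]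
    rw [hfindS]
    have hne' : ((p : Int) ≠ -1) := by omega
    rw [if_pos hne']
    have hln : PySem.Str.count (PySem.Str.slice t none (some ((p : Nat) : Int))) "\n" = k := by
      rw [PySem.Str.count_eq]
      have h1 : (PySem.Str.slice t none (some ((p : Nat) : Int))).toList = t.toList.take p := by
        rw [PySem.Str.toList_slice, PySem.Chars.slice_eq_listSlice, PySem.List.slice_to_natCast]
      rw [h1, show ("\n" : String).toList = ['\n'] from rfl, pvCountChar]
      exact hcount
    rw [hln]

-- ===== VERDICT (by name: the statement is the Claim_ definition above) =====
theorem extract_pdf_header_for_verify_spec : Claim_equal_extract_pdf_header_for_verify := by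
  intro pdf_path full_text _
  unfold Spec_extract_pdf_header_for_verify extract_pdf_header_for_verify extract_pdf_header_for_verify_alt
  by_cases h : full_text = ""
  · simp [h]
  · simp only [if_neg h]
    rw [pvHeader_eq]
    set t := PySem.Str.replace full_text "\r" "\n" with htdef
    have hlines : (PySem.Str.split? t "\n").getD []
        = (List.splitOn '\n' t.toList).map String.ofList := by
      rw [PySem.Str.split?, PySem.Chars.split?]
      rw [show ("\n" : String).toList = ['\n'] from rfl]
      simp [pvSplitEq]
    have hmem : ∀ m ∈ List.splitOn '\n' t.toList, ('\n' : Char) ∉ m := by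
      intro m hm
      exact pvNotMemSplit '\n' t.toList m hm
    set pieces := List.splitOn '\n' t.toList with hpc
    have hAidx : (((pieces.map String.ofList)).take 45).findIdx? pvP
        = (pieces.take 45).findIdx?
            (fun m => PySem.Chars.isIn "YourRef".toList m || PySem.Chars.isIn "Your Ref".toList m) := by
      rw [← List.map_take, List.findIdx?_map]
      congr 1
      funext m
      simp [pvP, Function.comp, PySem.Str.isIn_eq]
    have hor : (pieces.take 45).findIdx?
          (fun m => PySem.Chars.isIn "YourRef".toList m || PySem.Chars.isIn "Your Ref".toList m)
        = (pvOmin (pieces.findIdx? (fun m => PySem.Chars.isIn "YourRef".toList m))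
            (pieces.findIdx? (fun m => PySem.Chars.isIn "Your Ref".toList m))).bind
            (fun k => if k < 45 then some k else none) := by
      rw [pvFindIdxTake, pvFindIdxOr]
    have hs1 := pvStep t "YourRef" none (by decide) (by decide) hmem
    have hs2 := fun b => pvStep t "Your Ref" b (by decide) (by decide) hmem
    have hbest : List.foldl (pvBestStep t) none ["YourRef", "Your Ref"]
        = (pvOmin (pieces.findIdx? (fun m => PySem.Chars.isIn "YourRef".toList m))
            (pieces.findIdx? (fun m => PySem.Chars.isIn "Your Ref".toList m))).bind
            (fun k => if k < 45 then some k else none) := by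
      simp only [List.foldl, hs1, hs2]
      cases ho1 : pieces.findIdx? (fun m => PySem.Chars.isIn "YourRef".toList m) with
      | none =>
        cases ho2 : pieces.findIdx? (fun m => PySem.Chars.isIn "Your Ref".toList m) with
        | none => simp [pvOmin]
        | some k2 =>
          by_cases h2 : k2 < 45 <;> simp [pvOmin, h2]

      | some k1 =>
        cases ho2 : pieces.findIdx? (fun m => PySem.Chars.isIn "Your Ref".toList m) with
        | none =>
          by_cases h1 : k1 < 45 <;> simp [pvOmin, h1]
        | some k2 =>
          by_cases h1 : k1 < 45
          · by_cases h2 : k2 < k1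
            · have hm : min k1 k2 = k2 := by omega
              simp [pvOmin, h1, h2, hm, show k2 < 45 by omega]
            · have hm : min k1 k2 = k1 := by omega
              by_cases h2' : k2 < 45 <;> simp [pvOmin, h1, h2, h2', hm]
          · by_cases h2 : k2 < 45
            · have hm : min k1 k2 = k2 := by omega
              simp [pvOmin, h1, h2, hm]
            · have hm : ¬ min k1 k2 < 45 := by omega
              simp [pvOmin, h1, h2, hm]
    rw [hlines, hAidx, hor, hbest]
    cases hv : (pvOmin (pieces.findIdx? (fun m => PySem.Chars.isIn "YourRef".toList m))
        (pieces.findIdx? (fun m => PySem.Chars.isIn "Your Ref".toList m))).bind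
        (fun k => if k < 45 then some k else none) with
    | none => rfl
    | some k => rfl
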